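-- pv_equiv track=rewrite | github.com/jonathonreilly/toy-physics | scripts/frontier_causal_set_bridge.py | count_relations_and_chains
-- ===== SOURCE A (Python) =====
-- from collections import defaultdict, deque
--
-- def transitive_closure(
--     dag: dict[tuple[int, int], list[tuple[int, int]]],
-- ) -> dict[tuple[int, int], set[tuple[int, int]]]:
--     """Compute the full set of descendants for each node (transitive closure)."""
--     # Topological sort via Kahn's algorithm
--     in_degree: dict[tuple[int, int], int] = defaultdict(int)
--     all_nodes = set(dag.keys())
--     for node, children in dag.items():
--         for child in children:
--             in_degree[child] += 1
--             all_nodes.add(child)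
--
--     queue = deque(n for n in all_nodes if in_degree[n] == 0)
--     topo_order: list[tuple[int, int]] = []
--     while queue:
--         node = queue.popleft()
--         topo_order.append(node)
--         for child in dag.get(node, []):
--             in_degree[child] -= 1
--             if in_degree[child] == 0:
--                 queue.append(child)
--
--     # Build reachability in reverse topological order
--     reachable: dict[tuple[int, int], set[tuple[int, int]]] = {n: set() for n in all_nodes}
--     for node in reversed(topo_order):
--         for child in dag.get(node, []):
--             reachable[node].add(child)
--             reachable[node] |= reachable[child]
--
--     return reachable
--
-- def count_relations_and_chains(
--     dag: dict[tuple[int, int], list[tuple[int, int]]],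
-- ) -> tuple[int, int]:
--     """Count related pairs (R) and 3-element chains (C2) for the Myrheim-Meyer estimator.
--
--     R = number of pairs (x, y) with x < y (x is ancestor of y).
--     C2 = number of triples (x, z, y) with x < z < y.
--     """
--     reachable = transitive_closure(dag)
--
--     R = 0
--     C2 = 0
--     nodes = list(dag.keys())
--
--     for x in nodes:
--         descendants_x = reachable.get(x, set())
--         R += len(descendants_x)
--         for y in descendants_x:
--             # Count intermediaries z with x < z < y
--             descendants_y_ancestors = reachable.get(x, set()) & set()
--             # z must be reachable from x AND y must be reachable from z
--             for z in descendants_x: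
--                 if z != y and y in reachable.get(z, set()):
--                     C2 += 1
--
--     return R, C2
-- ===== SOURCE B (Python) =====
-- from collections import Counter
--
-- def count_relations_and_chains(dag):
--     """Count related pairs (R) and 3-element chains (C2).
--
--     Different algorithm: one fused reverse-topological sweep.  The topological
--     order is obtained BFS-style with a growing list and an index pointer, the
--     in-degrees come from a single Counter over all edges.  Then ONE backward
--     pass builds each closure set and accumulates both counters on the fly,
--     using the DAG identities desc(z) subset-of desc(x) for z in desc(x) and
--     z not-in desc(z): the number of chains x < z < y with x and z fixed is
--     just len(reach[z]), so no membership tests or pair loops are needed.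
--     """
--     in_degree = Counter(c for children in dag.values() for c in children)
--     all_nodes = set(dag)
--     all_nodes.update(in_degree)
--
--     order = [n for n in all_nodes if in_degree[n] == 0]
--     i = 0
--     while i < len(order):
--         node = order[i]
--         i += 1
--         for child in dag.get(node, []):
--             in_degree[child] -= 1
--             if in_degree[child] == 0:
--                 order.append(child)
--
--     reach = {}
--     R = 0
--     C2 = 0
--     for node in reversed(order):
--         s = set()
--         for child in dag.get(node, []):
--             s.add(child)
--             s |= reach.get(child, set())
--         reach[node] = s
--         R += len(s)
--         C2 += sum(len(reach.get(z, set())) for z in s)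
--     return R, C2
-- ===== Notes on version B (the rewrite author's own statement) =====
-- stated objective: faster
-- what changed: A builds the closure in a separate phase and then counts C2 with a doubly nested membership-tested pair loop over each descendant set; B does one fused reverse-topological sweep (BFS toposort with a list-and-index pointer and a Counter of in-degrees) that builds each closure set and accumulates R and C2 on the fly, using the DAG facts desc(z) ⊆ desc(x) and z ∉ desc(z) so each chain count is just len(reach[z]) with no pair loop or membership test at all.
import Mathlib
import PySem

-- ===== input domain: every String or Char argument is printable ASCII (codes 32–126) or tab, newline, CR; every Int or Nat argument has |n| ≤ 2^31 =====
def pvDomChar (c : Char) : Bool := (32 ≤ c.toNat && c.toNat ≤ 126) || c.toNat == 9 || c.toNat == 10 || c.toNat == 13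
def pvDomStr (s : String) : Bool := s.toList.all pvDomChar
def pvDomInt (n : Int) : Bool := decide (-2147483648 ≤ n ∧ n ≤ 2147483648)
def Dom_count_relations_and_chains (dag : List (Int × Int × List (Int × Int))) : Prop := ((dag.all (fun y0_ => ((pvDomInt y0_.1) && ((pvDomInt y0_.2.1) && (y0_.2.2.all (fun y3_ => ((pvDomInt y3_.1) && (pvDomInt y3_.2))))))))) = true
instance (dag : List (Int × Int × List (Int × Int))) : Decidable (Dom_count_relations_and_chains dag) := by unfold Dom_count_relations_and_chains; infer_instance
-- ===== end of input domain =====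

-- B replaces A's staged algorithm (separate transitive-closure phase, then a doubly nested
-- membership-tested pair loop per descendant set) by one fused reverse-topological sweep:
-- a BFS toposort over a growing list with an index pointer, then a single backward pass that
-- builds each closure set and accumulates R and C2 on the fly, each chain count being just
-- len(reach[z]) (valid because desc(z) ⊆ desc(x) for z ∈ desc(x) and z ∉ desc(z)).
-- Objective: faster (the quadratic pair loop per source disappears).

-- ===== PORT A =====
-- helper transitive_closure of Source A:
-- in_degree/all_nodes accumulation pass
def tcInit (dag : PySem.Dict (Int × Int) (List (Int × Int))) :
    PySem.Dict (Int × Int) Int × PySem.Set (Int × Int) :=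
  dag.items.foldl
    (fun st p => p.2.foldl
      (fun st c => (st.1.modify c 0 (· + 1), PySem.Set.add st.2 c)) st)
    (PySem.Dict.empty, PySem.Set.ofList dag.keys)

-- Kahn's 'while queue' loop; fuel is an upper bound on the number of pops
-- (each node is enqueued at most once, so |all_nodes| + total edges is safe)
def kahnLoop (dag : PySem.Dict (Int × Int) (List (Int × Int))) :
    Nat → List (Int × Int) → PySem.Dict (Int × Int) Int → List (Int × Int) → List (Int × Int)
  | 0, _, _, topo => topo
  | _ + 1, [], _, topo => topo
  | fuel + 1, n :: qs, indeg, topo =>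
      let st := (dag.getD n []).foldl
        (fun st c =>
          let d := st.1.modify c 0 (· - 1)
          (d, if d.getD c 0 = 0 then st.2 ++ [c] else st.2))
        (indeg, qs)
      kahnLoop dag fuel st.2 st.1 (topo ++ [n])

def transitive_closure (dag : PySem.Dict (Int × Int) (List (Int × Int))) :
    PySem.Dict (Int × Int) (PySem.Set (Int × Int)) :=
  let st := tcInit dag
  let indeg := st.1
  let allNodes := st.2
  let queue := allNodes.filter (fun n => indeg.getD n 0 == 0)
  let fuel := allNodes.length + (dag.items.map (fun p => p.2.length)).sum
  let topo := kahnLoop dag fuel queue indeg []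
  let reach0 := allNodes.foldl (fun d n => d.insert n PySem.Set.empty) PySem.Dict.empty
  topo.reverse.foldl
    (fun r node => (dag.getD node []).foldl
      (fun r child =>
        let r1 := r.modify node [] (fun s => PySem.Set.add s child)
        r1.modify node [] (fun s => PySem.Set.union s (r1.getD child [])))
      r)
    reach0

def count_relations_and_chains (dag : List (Int × Int × List (Int × Int))) : Int × Int :=
  let d := PySem.Dict.ofList (dag.map (fun t => ((t.1, t.2.1), t.2.2)))
  let reachable := transitive_closure d
  let nodes := d.keys
  nodes.foldl
    (fun rc x =>
      let descx := reachable.getD x []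
      let r := rc.1 + (descx.length : Int)
      let c2 := descx.foldl
        (fun c2 y =>
          let _descendants_y_ancestors := PySem.Set.inter (reachable.getD x []) []
          descx.foldl
            (fun c2 z => if z ≠ y ∧ y ∈ reachable.getD z [] then c2 + 1 else c2)
            c2)
        rc.2
      (r, c2))
    (0, 0)

-- ===== PORT B =====
-- 'while i < len(order)' BFS toposort over a growing list with an index pointer
def bfsLoop (dag : PySem.Dict (Int × Int) (List (Int × Int))) :
    Nat → Nat → List (Int × Int) → PySem.Dict (Int × Int) Int → List (Int × Int)
  | 0, _, order, _ => order
  | fuel + 1, i, order, indeg =>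
      if h : i < order.length then
        let node := order[i]
        let st := (dag.getD node []).foldl
          (fun st c =>
            let d := st.1.modify c 0 (· - 1)
            (d, if d.getD c 0 = 0 then st.2 ++ [c] else st.2))
          (indeg, order)
        bfsLoop dag fuel (i + 1) st.2 st.1
      else order

def count_relations_and_chains_alt (dag : List (Int × Int × List (Int × Int))) : Int × Int :=
  let d := PySem.Dict.ofList (dag.map (fun t => ((t.1, t.2.1), t.2.2)))
  let flat := d.items.flatMap (fun p => p.2)
  let indeg := PySem.Dict.counter flat
  let allNodes := PySem.Set.update (PySem.Set.ofList d.keys) indeg.keys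
  let order0 := allNodes.filter (fun n => indeg.getD n 0 == 0)
  let order := bfsLoop d (allNodes.length + flat.length) 0 order0 indeg
  let st := order.reverse.foldl
    (fun (st : PySem.Dict (Int × Int) (PySem.Set (Int × Int)) × Int × Int) node =>
      let s := (d.getD node []).foldl
        (fun s child => PySem.Set.union (PySem.Set.add s child) (st.1.getD child []))
        PySem.Set.empty
      let r := st.1.insert node s
      (r, st.2.1 + (s.length : Int),
          st.2.2 + ((s.map (fun z => ((r.getD z []).length : Int))).sum)))
    (PySem.Dict.empty, 0, 0)
  (st.2.1, st.2.2)

-- ===== PRECONDITION & SPEC =====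
def Spec_count_relations_and_chains (dag : List (Int × Int × List (Int × Int))) (out : Int × Int) : Prop := out = count_relations_and_chains_alt dag
instance (dag : List (Int × Int × List (Int × Int))) (out : Int × Int) : Decidable (Spec_count_relations_and_chains dag out) := by unfold Spec_count_relations_and_chains; infer_instance

-- ===== CLAIM (what is proved, stated in full; the proofs are below) =====
def Claim_equal_count_relations_and_chains : Prop := ∀ (dag : List (Int × Int × List (Int × Int))), Dom_count_relations_and_chains dag → Spec_count_relations_and_chains dag (count_relations_and_chains dag)

-- ===== LEMMAS AND PROOFS =====

-- children of a node, the flattened edge list, total in-degree, in-degree consumed by a list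
def pvCh (d : PySem.Dict (Int × Int) (List (Int × Int))) (n : Int × Int) : List (Int × Int) :=
  d.getD n []
def pvFlat (d : PySem.Dict (Int × Int) (List (Int × Int))) : List (Int × Int) :=
  d.items.flatMap (fun p => p.2)
def pvCNT (d : PySem.Dict (Int × Int) (List (Int × Int))) (n : Int × Int) : Nat :=
  (pvFlat d).count n
def pvE (d : PySem.Dict (Int × Int) (List (Int × Int))) (t : List (Int × Int)) (n : Int × Int) : Nat :=
  (t.flatMap (pvCh d)).count n

-- the shared inner decrement-and-enqueue fold of both toposort loops
def pvG (st : PySem.Dict (Int × Int) Int × List (Int × Int)) (c : Int × Int) :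
    PySem.Dict (Int × Int) Int × List (Int × Int) :=
  let d := st.1.modify c 0 (· - 1)
  (d, if d.getD c 0 = 0 then st.2 ++ [c] else st.2)

theorem pv_kahnLoop_eq (dag : PySem.Dict (Int × Int) (List (Int × Int)))
    (fuel : Nat) (n : Int × Int) (qs : List (Int × Int)) (indeg : PySem.Dict (Int × Int) Int)
    (topo : List (Int × Int)) :
    kahnLoop dag (fuel + 1) (n :: qs) indeg topo =
      kahnLoop dag fuel ((dag.getD n []).foldl pvG (indeg, qs)).2
        ((dag.getD n []).foldl pvG (indeg, qs)).1 (topo ++ [n]) := rfl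

theorem pv_bfsLoop_eq (dag : PySem.Dict (Int × Int) (List (Int × Int)))
    (fuel i : Nat) (order : List (Int × Int)) (indeg : PySem.Dict (Int × Int) Int)
    (h : i < order.length) :
    bfsLoop dag (fuel + 1) i order indeg =
      bfsLoop dag fuel (i + 1) ((dag.getD order[i] []).foldl pvG (indeg, order)).2
        ((dag.getD order[i] []).foldl pvG (indeg, order)).1 := by
  conv_lhs => rw [bfsLoop]
  simp only [dif_pos h]
  rfl

-- a property preserved by every step of a foldl is preserved by the foldl
theorem pv_foldl_preserve {α β : Type} (P : β → Prop) (l : List α) (g : β → α → β) (b : β)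
    (hb : P b) (hs : ∀ b x, P b → P (g b x)) : P (l.foldl g b) := by
  induction l generalizing b with
  | nil => exact hb
  | cons x xs ih => exact ih _ (hs _ _ hb)

-- ----- stage 1: the two initialisations agree -----

-- the in_degree/all_nodes pair accumulation splits into two independent folds
theorem pv_tcInit_split (l : List ((Int × Int) × List (Int × Int)))
    (a : PySem.Dict (Int × Int) Int) (b : PySem.Set (Int × Int)) :
    l.foldl (fun st p => p.2.foldl
        (fun st c => (st.1.modify c 0 (· + 1), PySem.Set.add st.2 c)) st) (a, b)
      = (l.foldl (fun x p => p.2.foldl (fun D c => D.modify c 0 (· + 1)) x) a,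
         l.foldl (fun y p => p.2.foldl (fun s c => PySem.Set.add s c) y) b) := by
  induction l generalizing a b with
  | nil => rfl
  | cons p l ih =>
      simp only [List.foldl_cons]
      rw [PySem.List.foldl_prod_mk
        (fun (D : PySem.Dict (Int × Int) Int) (c : Int × Int) => D.modify c 0 (· + 1))
        (fun (s : PySem.Set (Int × Int)) (c : Int × Int) => PySem.Set.add s c), ih]

theorem pv_tcInit_eq (d : PySem.Dict (Int × Int) (List (Int × Int))) :
    tcInit d = (PySem.Dict.counter (pvFlat d),
                PySem.Set.update (PySem.Set.ofList d.keys) (pvFlat d)) := by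
  unfold tcInit
  rw [pv_tcInit_split]
  unfold pvFlat
  rw [PySem.Dict.counter_eq_foldl, List.foldl_flatMap]
  rw [show ∀ (s : PySem.Set (Int × Int)) xs, PySem.Set.update s xs = xs.foldl PySem.Set.add s
      from fun _ _ => rfl, List.foldl_flatMap]

theorem pv_allNodes_eq (d : PySem.Dict (Int × Int) (List (Int × Int))) :
    PySem.Set.update (PySem.Set.ofList d.keys) (PySem.Dict.counter (pvFlat d)).keys =
      PySem.Set.update (PySem.Set.ofList d.keys) (pvFlat d) := by
  rw [PySem.Dict.keys_counter, PySem.Set.update_eq_append_filter,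
      PySem.Set.update_eq_append_filter, PySem.Set.ofList_ofList]

-- ----- stage 2: characterisation of the decrement fold -----

theorem pv_G_fst (cs : List (Int × Int)) (D : PySem.Dict (Int × Int) Int)
    (q : List (Int × Int)) (n : Int × Int) :
    ((cs.foldl pvG (D, q)).1).getD n 0 = D.getD n 0 - (cs.count n : Int) := by
  induction cs generalizing D q with
  | nil => simp
  | cons c cs ih =>
      simp only [List.foldl_cons, pvG, List.count_cons]
      rw [ih, PySem.Dict.getD_modify]
      by_cases h : n = c
      · subst h; simp only [if_pos rfl, beq_self_eq_true, if_true]; push_cast; ring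
      · have hb : (c == n) = false := by simpa using fun hh => h hh.symm
        simp only [if_neg h, hb, Bool.false_eq_true, if_false]
        push_cast; ring

theorem pv_G_snd (cs : List (Int × Int)) (D : PySem.Dict (Int × Int) Int)
    (q : List (Int × Int)) :
    ∃ adds, (cs.foldl pvG (D, q)).2 = q ++ adds ∧ adds.Nodup ∧
      (∀ c, c ∈ adds ↔ 0 < D.getD c 0 ∧ D.getD c 0 ≤ (cs.count c : Int)) := by
  induction cs generalizing D q with
  | nil =>
      refine ⟨[], by simp, List.nodup_nil, ?_⟩
      intro c
      simp only [List.not_mem_nil, List.count_nil, Nat.cast_zero, false_iff]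
      rintro ⟨h1, h2⟩; omega
  | cons c cs ih =>
      simp only [List.foldl_cons, pvG]
      have hDc : (D.modify c 0 (· - 1)).getD c 0 = D.getD c 0 - 1 :=
        PySem.Dict.getD_modify_self D c 0 _
      have hDx : ∀ x, x ≠ c → (D.modify c 0 (· - 1)).getD x 0 = D.getD x 0 := by
        intro x hx
        rw [PySem.Dict.getD_modify]
        exact if_neg hx
      obtain ⟨adds1, he, hnd, hiff⟩ := ih (D.modify c 0 (· - 1))
        (if (D.modify c 0 (· - 1)).getD c 0 = 0 then q ++ [c] else q)
      by_cases h1 : D.getD c 0 = 1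
      · have hcond : (D.modify c 0 (· - 1)).getD c 0 = 0 := by omega
        refine ⟨c :: adds1, ?_, ?_, ?_⟩
        · rw [he, if_pos hcond]; simp
        · refine List.nodup_cons.mpr ⟨?_, hnd⟩
          intro hc
          have h2 := (hiff c).mp hc
          omega
        · intro x
          simp only [List.mem_cons, hiff x, List.count_cons]
          by_cases hx : x = c
          · subst hx
            rw [hDc]
            simp only [beq_self_eq_true, if_true]
            constructor
            · intro _; push_cast; omega
            · intro _; exact Or.inl trivial
          · rw [hDx x hx]
            have hb : (c == x) = false := by simpa using fun hh => hx hh.symm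
            simp only [hb, Bool.false_eq_true, if_false]
            constructor
            · rintro (h2 | ⟨h2, h3⟩)
              · exact absurd h2 hx
              · push_cast at h3 ⊢; omega
            · rintro ⟨h2, h3⟩
              right
              push_cast at h3 ⊢
              omega
      · have hcond : ¬ (D.modify c 0 (· - 1)).getD c 0 = 0 := by omega
        refine ⟨adds1, by rw [he, if_neg hcond], hnd, ?_⟩
        intro x
        rw [hiff x, List.count_cons]
        by_cases hx : x = c
        · subst hx
          rw [hDc]
          simp only [beq_self_eq_true, if_true]
          push_cast
          constructor <;> (rintro ⟨h2, h3⟩; constructor <;> omega)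
        · rw [hDx x hx]
          have hb : (c == x) = false := by simpa using fun hh => hx hh.symm
          simp only [hb, Bool.false_eq_true, if_false]
          push_cast
          rfl

theorem pv_G_shift (cs : List (Int × Int)) (D : PySem.Dict (Int × Int) Int)
    (q pre : List (Int × Int)) :
    cs.foldl pvG (D, pre ++ q) = ((cs.foldl pvG (D, q)).1, pre ++ (cs.foldl pvG (D, q)).2) := by
  induction cs generalizing D q with
  | nil => rfl
  | cons c cs ih =>
      simp only [List.foldl_cons, pvG]
      split_ifs with h
      · rw [List.append_assoc, ih]
      · rw [ih]

-- ----- stage 3: in-degree accounting -----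

theorem pv_count_flatMap {α : Type} (l : List α) (g : α → List (Int × Int))
    (c : Int × Int) : ((l.flatMap g).count c) = (l.map (fun x => (g x).count c)).sum := by
  induction l with
  | nil => simp
  | cons x xs ih => simp [List.count_append, ih]

theorem pv_CNT_eq (d : PySem.Dict (Int × Int) (List (Int × Int))) (hk : d.keys.Nodup)
    (c : Int × Int) :
    pvCNT d c = d.keys.toFinset.sum (fun m => (pvCh d m).count c) := by
  unfold pvCNT pvFlat
  rw [pv_count_flatMap, PySem.Dict.items_eq_map_keys d hk [], List.map_map,
      List.sum_toFinset _ hk]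
  rfl

theorem pv_E_eq (d : PySem.Dict (Int × Int) (List (Int × Int))) (t : List (Int × Int))
    (ht : t.Nodup) (c : Int × Int) :
    pvE d t c = t.toFinset.sum (fun m => (pvCh d m).count c) := by
  unfold pvE
  rw [pv_count_flatMap, List.sum_toFinset _ ht]

theorem pv_ch_zero_of_not_mem_keys (d : PySem.Dict (Int × Int) (List (Int × Int)))
    (m : Int × Int) (hm : m ∉ d.keys) : pvCh d m = [] := by
  apply PySem.Dict.getD_of_not_contains
  rw [← Bool.not_eq_true]
  intro hc
  exact hm ((PySem.Dict.contains_iff_mem_keys d m).mp hc)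

theorem pv_mem_flat (d : PySem.Dict (Int × Int) (List (Int × Int))) (m n : Int × Int)
    (h : n ∈ pvCh d m) : n ∈ pvFlat d := by
  unfold pvCh at h
  have hne : d.getD m [] ≠ [] := List.ne_nil_of_mem h
  by_cases hc : d.contains m = true
  · obtain ⟨v, hv⟩ : ∃ v, d.get? m = some v := by
      have := PySem.Dict.contains_eq_isSome_get? (d := d) (k := m)
      rw [hc] at this
      exact Option.isSome_iff_exists.mp this.symm
    have hgd : d.getD m [] = v := PySem.Dict.getD_of_get?_eq_some d [] hv
    have hm : (m, v) ∈ d.items := PySem.Dict.mem_items_of_get?_eq_some d hv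
    exact List.mem_flatMap.mpr ⟨(m, v), hm, by rw [← hgd]; exact h⟩
  · exact absurd (PySem.Dict.getD_of_not_contains d [] (by simpa using hc)) hne

theorem pv_E_full (d : PySem.Dict (Int × Int) (List (Int × Int))) (t : List (Int × Int))
    (hk : d.keys.Nodup) (ht : t.Nodup) (c : Int × Int) (h : pvCNT d c ≤ pvE d t c) :
    ∀ m, c ∈ pvCh d m → m ∈ t := by
  intro m hm
  by_contra hmt
  have hmk : m ∈ d.keys := by
    by_contra hmk
    rw [pv_ch_zero_of_not_mem_keys d m hmk] at hm
    exact absurd hm List.not_mem_nil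
  have hfm : 1 ≤ (pvCh d m).count c := List.one_le_count_iff.mpr hm
  have h1 : t.toFinset.sum (fun m => (pvCh d m).count c)
      = (t.toFinset ∩ d.keys.toFinset).sum (fun m => (pvCh d m).count c) := by
    symm
    apply Finset.sum_subset Finset.inter_subset_left
    intro x hx hx2
    have hxk : x ∉ d.keys := by
      intro hxk
      exact hx2 (Finset.mem_inter.mpr ⟨hx, List.mem_toFinset.mpr hxk⟩)
    simp only [pv_ch_zero_of_not_mem_keys d x hxk, List.count_nil]
  have hsub : t.toFinset ∩ d.keys.toFinset ⊆ (d.keys.toFinset).erase m := by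
    intro x hx
    rcases Finset.mem_inter.mp hx with ⟨hx1, hx2⟩
    refine Finset.mem_erase.mpr ⟨?_, hx2⟩
    intro he; subst he
    exact hmt (List.mem_toFinset.mp hx1)
  have h2 : (t.toFinset ∩ d.keys.toFinset).sum (fun m => (pvCh d m).count c)
      ≤ ((d.keys.toFinset).erase m).sum (fun m => (pvCh d m).count c) :=
    Finset.sum_le_sum_of_subset hsub
  have h3 := Finset.add_sum_erase d.keys.toFinset (fun m => (pvCh d m).count c)
    (List.mem_toFinset.mpr hmk)
  beta_reduce at h3
  rw [pv_CNT_eq d hk, pv_E_eq d t ht] at h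
  omega

-- ----- stage 4: the toposort loops -----

def pvJJ (d : PySem.Dict (Int × Int) (List (Int × Int))) (AN : List (Int × Int))
    (q : List (Int × Int)) (D : PySem.Dict (Int × Int) Int) (t : List (Int × Int)) : Prop :=
  (∀ n, D.getD n 0 = (pvCNT d n : Int) - (pvE d t n : Int)) ∧
  (t ++ q).Nodup ∧
  (∀ n ∈ t ++ q, D.getD n 0 ≤ 0) ∧
  (∀ n ∈ t ++ q, n ∈ AN) ∧
  (∀ n ∈ q, ∀ m, n ∈ pvCh d m → m ∈ t) ∧
  (∀ n ∈ t, ∀ m, n ∈ pvCh d m → m ∈ t) ∧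
  t.Pairwise (fun a b => a ∉ pvCh d b) ∧
  (∀ a ∈ t, ∀ b ∈ q, a ∉ pvCh d b) ∧
  (∀ n ∈ t ++ q, n ∉ pvCh d n)

theorem pv_JJ_step (d : PySem.Dict (Int × Int) (List (Int × Int))) (AN : List (Int × Int))
    (hk : d.keys.Nodup) (hFl : ∀ n ∈ pvFlat d, n ∈ AN)
    (n0 : Int × Int) (qt : List (Int × Int)) (D : PySem.Dict (Int × Int) Int)
    (t : List (Int × Int)) (hJJ : pvJJ d AN (n0 :: qt) D t) :
    pvJJ d AN ((pvCh d n0).foldl pvG (D, qt)).2 ((pvCh d n0).foldl pvG (D, qt)).1 (t ++ [n0]) := by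
  obtain ⟨j1, j2, j3, jAN, j4, j6, p2, p3, p4⟩ := hJJ
  obtain ⟨adds, hadds, handd, hiffA⟩ := pv_G_snd (pvCh d n0) D qt
  have hfst := pv_G_fst (pvCh d n0) D qt
  have fact1 : ∀ c ∈ adds, c ∉ t ++ n0 :: qt := by
    intro c hc hmem
    have h1 := (hiffA c).mp hc
    have h2 := j3 c hmem
    omega
  have fact1' : ∀ c ∈ adds, c ∈ pvCh d n0 := by
    intro c hc
    have h1 := (hiffA c).mp hc
    have h2 : 0 < (pvCh d n0).count c := by omega
    exact List.count_pos_iff.mp h2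
  have hn0q : n0 ∈ t ++ n0 :: qt := by simp
  have hnodup2 : (t ++ [n0]).Nodup :=
    List.Sublist.nodup
      (List.Sublist.append_left (List.cons_sublist_cons.mpr (List.nil_sublist qt)) t) j2
  have hE : ∀ n, pvE d (t ++ [n0]) n = pvE d t n + (pvCh d n0).count n := by
    intro n
    unfold pvE
    rw [List.flatMap_append]
    simp [List.count_append]
  have fact3 : ∀ c ∈ adds, ∀ m, c ∈ pvCh d m → m ∈ t ++ [n0] := by
    intro c hc m hm
    have h1 := (hiffA c).mp hc
    have h2 := j1 c
    refine pv_E_full d (t ++ [n0]) hk hnodup2 c ?_ m hm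
    rw [hE c]
    omega
  have tsub : ∀ x ∈ t, x ∈ t ++ n0 :: qt := by intro x hx; simp [hx]
  have qtsub : ∀ x ∈ qt, x ∈ t ++ n0 :: qt := by intro x hx; simp [hx]
  have tdisj : ∀ x ∈ t, x ∉ n0 :: qt := by
    intro x hx hx2
    exact (List.nodup_append.mp j2).2.2 x hx x hx2 rfl
  refine ⟨?_, ?_, ?_, ?_, ?_, ?_, ?_, ?_, ?_⟩
  · -- j1
    intro n
    rw [hfst n, j1 n, hE n]
    push_cast
    ring
  · -- j2: nodup
    rw [hadds, show t ++ [n0] ++ (qt ++ adds) = (t ++ n0 :: qt) ++ adds by simp]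
    refine List.nodup_append.mpr ⟨j2, handd, ?_⟩
    intro a ha b hb he
    subst he
    exact fact1 a hb ha
  · -- j3
    intro n hn
    rw [hadds] at hn
    rw [hfst n]
    have : n ∈ t ++ n0 :: qt ∨ n ∈ adds := by
      simp only [List.mem_append, List.mem_cons] at hn ⊢
      tauto
    rcases this with h | h
    · have := j3 n h
      have : (0 : Int) ≤ ((pvCh d n0).count n : Int) := by positivity
      omega
    · have := (hiffA n).mp h
      omega
  · -- membership in AN
    intro n hn
    rw [hadds] at hn
    have : n ∈ t ++ n0 :: qt ∨ n ∈ adds := by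
      simp only [List.mem_append, List.mem_cons] at hn ⊢
      tauto
    rcases this with h | h
    · exact jAN n h
    · exact hFl n (pv_mem_flat d n0 n (fact1' n h))
  · -- j4: sources of queued are popped
    intro n hn m hm
    rw [hadds] at hn
    rcases List.mem_append.mp hn with h | h
    · have := j4 n (by simp [h]) m hm
      simp [this]
    · exact fact3 n h m hm
  · -- j6: sources of popped are popped
    intro n hn m hm
    rcases List.mem_append.mp hn with h | h
    · have := j6 n h m hm
      simp [this]
    · have hn0 : n = n0 := by simpa using h
      have := j4 n0 (by simp) m (hn0 ▸ hm)
      simp [this]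
  · -- pairwise
    refine List.pairwise_append.mpr ⟨p2, by simp, ?_⟩
    intro a ha b hb
    have hb0 : b = n0 := by simpa using hb
    subst hb0
    exact p3 a ha b (by simp)
  · -- p3
    intro a ha b hb hab
    rw [hadds] at hb
    rcases List.mem_append.mp hb with hbq | hba
    · rcases List.mem_append.mp ha with hat | han0
      · -- a ∈ t, b ∈ qt
        exact p3 a hat b (by simp [hbq]) hab
      · -- a = n0, b ∈ qt : then b is a source of n0, so b ∈ t — contradicting nodup
        have ha0 : a = n0 := by simpa using han0
        subst ha0
        have hbt := j4 a (by simp) b hab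
        exact tdisj b hbt (by simp [hbq])
    · -- b ∈ adds
      rcases List.mem_append.mp ha with hat | han0
      · have hbt := j6 a hat b hab
        exact fact1 b hba (by simp [hbt])
      · have ha0 : a = n0 := by simpa using han0
        subst ha0
        have hbt := j4 a (by simp) b hab
        exact fact1 b hba (by simp [hbt])
  · -- p4: no self-loop among seen nodes
    intro n hn hself
    rw [hadds] at hn
    have : n ∈ t ++ n0 :: qt ∨ n ∈ adds := by
      simp only [List.mem_append, List.mem_cons] at hn ⊢
      tauto
    rcases this with h | h
    · exact p4 n h hself
    · have := fact3 n h n hself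
      rcases List.mem_append.mp this with h2 | h2
      · exact fact1 n h (by simp [h2])
      · exact fact1 n h (by simp [show n = n0 by simpa using h2])

theorem pv_mainKahn (d : PySem.Dict (Int × Int) (List (Int × Int))) (AN : List (Int × Int))
    (hk : d.keys.Nodup) (hFl : ∀ n ∈ pvFlat d, n ∈ AN) :
    ∀ (fuel : Nat) (q : List (Int × Int)) (D : PySem.Dict (Int × Int) Int)
      (t : List (Int × Int)), pvJJ d AN q D t → AN.length - t.length ≤ fuel →
      bfsLoop d fuel t.length (t ++ q) D = kahnLoop d fuel q D t ∧
      (kahnLoop d fuel q D t).Nodup ∧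
      (kahnLoop d fuel q D t).Pairwise (fun a b => a ∉ pvCh d b) ∧
      (∀ n ∈ kahnLoop d fuel q D t, n ∉ pvCh d n) := by
  intro fuel
  induction fuel with
  | zero =>
      intro q D t hJJ hfuel
      obtain ⟨j1, j2, j3, jAN, j4, j6, p2, p3, p4⟩ := hJJ
      cases q with
      | nil =>
          refine ⟨by simp [bfsLoop, kahnLoop], by simpa using j2, p2, ?_⟩
          intro n hn
          exact p4 n (by simpa [kahnLoop] using hn)
      | cons n0 qt =>
          exfalso
          have hsub : (t ++ n0 :: qt).length ≤ AN.length :=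
            (List.subperm_of_subset j2 (fun x hx => jAN x hx)).length_le
          simp only [List.length_append, List.length_cons] at hsub
          omega
  | succ fuel ih =>
      intro q D t hJJ hfuel
      cases q with
      | nil =>
          obtain ⟨j1, j2, j3, jAN, j4, j6, p2, p3, p4⟩ := hJJ
          have hbfs : bfsLoop d (fuel + 1) t.length (t ++ []) D = t := by
            rw [List.append_nil]
            rw [show bfsLoop d (fuel + 1) t.length t D
                = if h : t.length < t.length then _ else t from rfl]
            simp
          refine ⟨by simpa [kahnLoop] using hbfs, by simpa using j2, p2, ?_⟩
          intro n hn
          exact p4 n (by simpa [kahnLoop] using hn)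
      | cons n0 qt =>
          have hstep := pv_JJ_step d AN hk hFl n0 qt D t hJJ
          have hlen : (t ++ [n0]).length = t.length + 1 := by simp
          have hfuel' : AN.length - (t ++ [n0]).length ≤ fuel := by
            rw [hlen]; omega
          obtain ⟨hbfs, hnd, hpw, hsl⟩ :=
            ih ((pvCh d n0).foldl pvG (D, qt)).2 ((pvCh d n0).foldl pvG (D, qt)).1
              (t ++ [n0]) hstep hfuel'
          have hkahn : kahnLoop d (fuel + 1) (n0 :: qt) D t =
              kahnLoop d fuel ((pvCh d n0).foldl pvG (D, qt)).2
                ((pvCh d n0).foldl pvG (D, qt)).1 (t ++ [n0]) :=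
            pv_kahnLoop_eq d fuel n0 qt D t
          refine ⟨?_, by rw [hkahn]; exact hnd, by rw [hkahn]; exact hpw, ?_⟩
          · -- the bfs side takes the same step
            have hlt : t.length < (t ++ n0 :: qt).length := by simp
            have hget : (t ++ n0 :: qt)[t.length]'hlt = n0 := by
              rw [List.getElem_append_right (Nat.le_refl t.length)]
              simp
            have hb := pv_bfsLoop_eq d fuel t.length (t ++ n0 :: qt) D hlt
            rw [hb]
            simp only [hget]
            rw [show (t ++ n0 :: qt) = (t ++ [n0]) ++ qt by simp]
            rw [pv_G_shift (d.getD n0 []) D qt (t ++ [n0])]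
            simp only [pvCh] at hbfs
            rw [hkahn]
            simp only [pvCh]
            rw [← hbfs, hlen]
          · intro n hn
            rw [hkahn] at hn
            exact hsl n hn
-- ----- stage 5: the closure pass -----

-- A's and B's per-node steps of the backward pass
def pvStepA (d : PySem.Dict (Int × Int) (List (Int × Int)))
    (r : PySem.Dict (Int × Int) (PySem.Set (Int × Int))) (node : Int × Int) :
    PySem.Dict (Int × Int) (PySem.Set (Int × Int)) :=
  (d.getD node []).foldl
    (fun r child =>
      let r1 := r.modify node [] (fun s => PySem.Set.add s child)
      r1.modify node [] (fun s => PySem.Set.union s (r1.getD child [])))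
    r

def pvStepB (d : PySem.Dict (Int × Int) (List (Int × Int)))
    (st : PySem.Dict (Int × Int) (PySem.Set (Int × Int)) × Int × Int) (node : Int × Int) :
    PySem.Dict (Int × Int) (PySem.Set (Int × Int)) × Int × Int :=
  let s := (d.getD node []).foldl
    (fun s child => PySem.Set.union (PySem.Set.add s child) (st.1.getD child []))
    PySem.Set.empty
  let r := st.1.insert node s
  (r, st.2.1 + (s.length : Int),
      st.2.2 + ((s.map (fun z => ((r.getD z []).length : Int))).sum))

-- membership in the closure-set builder fold
theorem pv_bf_mem (r : PySem.Dict (Int × Int) (PySem.Set (Int × Int)))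
    (cs : List (Int × Int)) (s0 : PySem.Set (Int × Int)) (z : Int × Int) :
    z ∈ cs.foldl (fun s c => PySem.Set.union (PySem.Set.add s c) (r.getD c [])) s0 ↔
      z ∈ s0 ∨ ∃ c ∈ cs, z = c ∨ z ∈ r.getD c [] := by
  induction cs generalizing s0 with
  | nil => simp
  | cons c cs ih =>
      simp only [List.foldl_cons]
      rw [ih]
      simp only [PySem.Set.mem_union, PySem.Set.mem_add, List.mem_cons]
      constructor
      · rintro (((h | h) | h) | ⟨c', hc', h⟩)
        · exact Or.inl h
        · exact Or.inr ⟨c, Or.inl rfl, Or.inl h⟩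
        · exact Or.inr ⟨c, Or.inl rfl, Or.inr h⟩
        · exact Or.inr ⟨c', Or.inr hc', h⟩
      · rintro (h | ⟨c', (he | he), h⟩)
        · exact Or.inl (Or.inl (Or.inl h))
        · subst he
          rcases h with h | h
          · exact Or.inl (Or.inl (Or.inr h))
          · exact Or.inl (Or.inr h)
        · exact Or.inr ⟨c', he, h⟩

theorem pv_bf_nodup (r : PySem.Dict (Int × Int) (PySem.Set (Int × Int)))
    (cs : List (Int × Int)) (s0 : PySem.Set (Int × Int)) (h : s0.Nodup) :
    (cs.foldl (fun s c => PySem.Set.union (PySem.Set.add s c) (r.getD c [])) s0).Nodup := by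
  refine pv_foldl_preserve List.Nodup cs _ s0 h ?_
  intro s c hs
  exact PySem.Set.nodup_union _ _ (PySem.Set.nodup_add _ _ hs)

-- A's step only rewrites the node's own entry, with the same builder fold
theorem pv_stepA_fold (cs : List (Int × Int))
    (r : PySem.Dict (Int × Int) (PySem.Set (Int × Int))) (node : Int × Int)
    (hch : ∀ c ∈ cs, c ≠ node) :
    ∀ k, (cs.foldl
      (fun r child =>
        let r1 := r.modify node [] (fun s => PySem.Set.add s child)
        r1.modify node [] (fun s => PySem.Set.union s (r1.getD child [])))
      r).getD k []
      = if k = node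
        then cs.foldl (fun s c => PySem.Set.union (PySem.Set.add s c) (r.getD c []))
          (r.getD node [])
        else r.getD k [] := by
  induction cs generalizing r with
  | nil =>
      intro k
      by_cases h : k = node
      · subst h; simp
      · simp [h]
  | cons c cs ih =>
      intro k
      have hc : c ≠ node := hch c (by simp)
      simp only [List.foldl_cons]
      have hr1get : ((r.modify node [] (fun s => PySem.Set.add s c)).getD c []) = r.getD c [] := by
        rw [PySem.Dict.getD_modify]
        exact if_neg hc
      have hstep : ∀ k', ((r.modify node [] (fun s => PySem.Set.add s c)).modify node []
          (fun s => PySem.Set.union s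
            ((r.modify node [] (fun s => PySem.Set.add s c)).getD c []))).getD k' []
          = if k' = node
            then PySem.Set.union (PySem.Set.add (r.getD node []) c) (r.getD c [])
            else r.getD k' [] := by
        intro k'
        by_cases h : k' = node
        · rw [h, PySem.Dict.getD_modify_self, PySem.Dict.getD_modify_self, hr1get,
            if_pos rfl]
        · rw [PySem.Dict.getD_modify, if_neg h, PySem.Dict.getD_modify, if_neg h, if_neg h]
      rw [ih _ (fun c' hc' => hch c' (by simp [hc']))]
      by_cases h : k = node
      · rw [if_pos h, if_pos h, hstep node, if_pos rfl]
        refine PySem.List.foldl_congr_mem cs _ _ _ ?_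
        intro acc x hx
        rw [hstep x, if_neg (hch x (by simp [hx]))]
      · rw [if_neg h, if_neg h, hstep k, if_neg h]

-- invariant of the backward pass, over the processed prefix 'done' of L
def pvPassInv (d : PySem.Dict (Int × Int) (List (Int × Int))) (L done : List (Int × Int))
    (dA : PySem.Dict (Int × Int) (PySem.Set (Int × Int))) : Prop :=
  (∀ k, k ∉ done → dA.getD k [] = []) ∧
  (∀ k, dA.getD k [] ≠ [] → pvCh d k ≠ []) ∧
  (∀ k ∈ done, (dA.getD k []).Nodup ∧ k ∉ dA.getD k [] ∧
    (∀ z ∈ dA.getD k [], (z ∈ L → z ∈ done) ∧ dA.getD z [] ⊆ dA.getD k []))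

theorem pv_pass (d : PySem.Dict (Int × Int) (List (Int × Int))) (L : List (Int × Int))
    (hnd : L.Nodup) (hpw : L.Pairwise (fun a b => b ∉ pvCh d a))
    (hself : ∀ n ∈ L, n ∉ pvCh d n) :
    ∀ (todo done : List (Int × Int)), L = done ++ todo →
    ∀ (dA dB : PySem.Dict (Int × Int) (PySem.Set (Int × Int))) (R C2 : Int),
      (∀ k, dB.getD k [] = dA.getD k []) → pvPassInv d L done dA →
      (∀ k, (todo.foldl (pvStepB d) (dB, R, C2)).1.getD k [] =
            (todo.foldl (pvStepA d) dA).getD k []) ∧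
      (∀ k ∈ done, (todo.foldl (pvStepA d) dA).getD k [] = dA.getD k []) ∧
      (todo.foldl (pvStepB d) (dB, R, C2)).2.1 =
        R + (todo.map (fun n => (((todo.foldl (pvStepA d) dA).getD n []).length : Int))).sum ∧
      (todo.foldl (pvStepB d) (dB, R, C2)).2.2 =
        C2 + (todo.map (fun n => (((todo.foldl (pvStepA d) dA).getD n []).map
              (fun z => (((todo.foldl (pvStepA d) dA).getD z []).length : Int))).sum)).sum ∧
      pvPassInv d L (done ++ todo) (todo.foldl (pvStepA d) dA) := by
  intro todo
  induction todo with
  | nil =>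
      intro done hL dA dB R C2 h2 hinv
      refine ⟨h2, fun k _ => rfl, by simp, by simp, by simpa using hinv⟩
  | cons node rest ih =>
      intro done hL dA dB R C2 h2 hinv
      obtain ⟨ia, ib, ic⟩ := hinv
      have hdoneL : ∀ x ∈ done, x ∈ L := by
        intro x hx; rw [hL]; exact List.mem_append.mpr (Or.inl hx)
      have hnodeL : node ∈ L := by rw [hL]; simp
      have hnode_done : node ∉ done := by
        intro hc
        exact (List.nodup_append.mp (hL ▸ hnd)).2.2 node hc node (by simp) rfl
      have hchild_ne : ∀ c ∈ d.getD node [], c ≠ node := by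
        intro c hc he
        exact hself node hnodeL (by simpa [pvCh] using he ▸ hc)
      have hchild_done : ∀ c ∈ d.getD node [], c ∈ L → c ∈ done := by
        intro c hc hcL
        rcases List.mem_append.mp (hL ▸ hcL) with h | h
        · exact h
        · rcases List.mem_cons.mp h with he | he
          · exact absurd he (hchild_ne c hc)
          · exfalso
            have hpw2 := (List.pairwise_append.mp (hL ▸ hpw)).2.1
            have := (List.pairwise_cons.mp hpw2).1 c he
            exact this (by simpa [pvCh] using hc)
      have hA0 : dA.getD node [] = [] := ia node hnode_done
      have hstepA' : ∀ k, (pvStepA d dA node).getD k [] =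
          if k = node
          then (d.getD node []).foldl
            (fun s c => PySem.Set.union (PySem.Set.add s c) (dA.getD c [])) PySem.Set.empty
          else dA.getD k [] := by
        intro k
        unfold pvStepA
        rw [pv_stepA_fold (d.getD node []) dA node hchild_ne k, hA0]
        rfl
      set S := (d.getD node []).foldl
        (fun s c => PySem.Set.union (PySem.Set.add s c) (dA.getD c [])) PySem.Set.empty with hS
      have hSB : (d.getD node []).foldl
          (fun s c => PySem.Set.union (PySem.Set.add s c) (dB.getD c [])) PySem.Set.empty = S := by
        rw [hS]
        exact PySem.List.foldl_congr_mem _ _ _ _ (fun acc c _ => by rw [h2 c])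
      have hSmem : ∀ z ∈ S, ∃ c ∈ d.getD node [], z = c ∨ z ∈ dA.getD c [] := by
        intro z hz
        rcases (pv_bf_mem dA (d.getD node []) PySem.Set.empty z).mp (hS ▸ hz) with h | h
        · exact absurd h (List.not_mem_nil)
        · exact h
      have hSmono : ∀ c ∈ d.getD node [], c ∈ S ∧ ∀ z ∈ dA.getD c [], z ∈ S := by
        intro c hc
        constructor
        · exact (pv_bf_mem dA _ _ c).mpr (Or.inr ⟨c, hc, Or.inl rfl⟩)
        · intro z hz
          exact (pv_bf_mem dA _ _ z).mpr (Or.inr ⟨c, hc, Or.inr hz⟩)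
      have hSnodup : S.Nodup := pv_bf_nodup dA _ _ List.nodup_nil
      have hchild_entry : ∀ c ∈ d.getD node [], ∀ z ∈ dA.getD c [], z ∈ L → z ∈ done := by
        intro c hc z hz hzL
        by_cases hcd : c ∈ done
        · exact ((ic c hcd).2.2 z hz).1 hzL
        · rw [ia c hcd] at hz
          exact absurd hz (List.not_mem_nil)
      have hSL : ∀ z ∈ S, z ∈ L → z ∈ done ∨ z = node := by
        intro z hz hzL
        obtain ⟨c, hc, h | h⟩ := hSmem z hz
        · subst h; exact Or.inl (hchild_done z hc hzL)
        · exact Or.inl (hchild_entry c hc z h hzL)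
      have hnode_not_S : node ∉ S := by
        intro hz
        obtain ⟨c, hc, h | h⟩ := hSmem node hz
        · exact hchild_ne c hc h.symm
        · exact hnode_done (hchild_entry c hc node h hnodeL)
      have hSsub : ∀ z ∈ S, dA.getD z [] ⊆ S := by
        intro z hz
        obtain ⟨c, hc, h | h⟩ := hSmem z hz
        · intro w hw
          exact (hSmono c hc).2 w (h ▸ hw)
        · by_cases hcd : c ∈ done
          · intro w hw
            exact (hSmono c hc).2 w (((ic c hcd).2.2 z h).2 hw)
          · rw [ia c hcd] at h; exact absurd h (List.not_mem_nil)
      have hinv' : pvPassInv d L (done ++ [node]) (pvStepA d dA node) := by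
        refine ⟨?_, ?_, ?_⟩
        · intro k hk
          have hk1 : k ∉ done := fun h => hk (by simp [h])
          have hk2 : k ≠ node := fun h => hk (by simp [h])
          rw [hstepA' k, if_neg hk2]
          exact ia k hk1
        · intro k hk
          rw [hstepA' k] at hk
          by_cases h : k = node
          · rw [if_pos h] at hk
            intro hch
            apply hk
            have hch' : d.getD node [] = [] := by rw [← h]; simpa [pvCh] using hch
            rw [hS, hch']
            rfl
          · rw [if_neg h] at hk
            exact ib k hk
        · intro k hk
          rcases List.mem_append.mp hk with hkd | hkn
          · have hkne : k ≠ node := fun h => hnode_done (h ▸ hkd)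
            rw [hstepA' k, if_neg hkne]
            obtain ⟨e1, e2, e3⟩ := ic k hkd
            refine ⟨e1, e2, ?_⟩
            intro z hz
            have hz3 := e3 z hz
            have hzne : z ≠ node := by
              intro he
              apply hnode_done
              have hzL : z ∈ L := by rw [he]; exact hnodeL
              have hzd := hz3.1 hzL
              rwa [he] at hzd
            rw [hstepA' z, if_neg hzne]
            exact ⟨fun h => by simp [hz3.1 h], hz3.2⟩
          · have hkn' : k = node := by simpa using hkn
            subst hkn'
            rw [hstepA' k, if_pos rfl]
            refine ⟨hSnodup, hnode_not_S, ?_⟩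
            intro z hz
            have hzne : z ≠ k := fun h => hnode_not_S (h ▸ hz)
            rw [hstepA' z, if_neg hzne]
            constructor
            · intro hzL
              rcases hSL z hz hzL with h | h
              · simp [h]
              · exact absurd h hzne
            · exact hSsub z hz
      have h2' : ∀ k, (dB.insert node S).getD k [] = (pvStepA d dA node).getD k [] := by
        intro k
        rw [PySem.Dict.getD_insert, hstepA' k]
        by_cases h : k = node
        · simp [h]
        · simp [h, h2 k]
      have hLrest : L = (done ++ [node]) ++ rest := by rw [hL]; simp
      obtain ⟨c1, c2, c3, c4, c5⟩ := ih (done ++ [node]) hLrest (pvStepA d dA node)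
        (dB.insert node S) (R + (S.length : Int))
        (C2 + ((S.map (fun z => (((dB.insert node S).getD z []).length : Int))).sum))
        h2' hinv'
      have hBstep : pvStepB d (dB, R, C2) node =
          (dB.insert node S, R + (S.length : Int),
           C2 + ((S.map (fun z => (((dB.insert node S).getD z []).length : Int))).sum)) := by
        unfold pvStepB
        rw [show (dB, R, C2).1 = dB from rfl]
        rw [hSB]
      have hfoldB : (node :: rest).foldl (pvStepB d) (dB, R, C2)
          = rest.foldl (pvStepB d) (dB.insert node S, R + (S.length : Int),
            C2 + ((S.map (fun z => (((dB.insert node S).getD z []).length : Int))).sum)) := by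
        rw [List.foldl_cons, hBstep]
      have hfoldA : (node :: rest).foldl (pvStepA d) dA
          = rest.foldl (pvStepA d) (pvStepA d dA node) := rfl
      have hfinalnode : (rest.foldl (pvStepA d) (pvStepA d dA node)).getD node [] = S := by
        rw [c2 node (by simp), hstepA' node, if_pos rfl]
      -- the per-z C2 term written with the final table
      have hterm : (S.map (fun z => (((dB.insert node S).getD z []).length : Int))).sum
          = (S.map (fun z =>
              (((rest.foldl (pvStepA d) (pvStepA d dA node)).getD z []).length : Int))).sum := by
        refine congrArg _ (List.map_congr_left ?_)
        intro z hz
        have hzne : z ≠ node := fun h => hnode_not_S (h ▸ hz)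
        rw [PySem.Dict.getD_insert, if_neg hzne, h2 z]
        by_cases hzL : z ∈ L
        · rcases hSL z hz hzL with h | h
          · rw [c2 z (by simp [h]), hstepA' z, if_neg hzne]
          · exact absurd h hzne
        · obtain ⟨f1, _, _⟩ := c5
          have hznotin : z ∉ (done ++ [node]) ++ rest := by rw [← hLrest]; exact hzL
          rw [f1 z hznotin, ia z (fun hc => hzL (hdoneL z hc))]
      refine ⟨?_, ?_, ?_, ?_, ?_⟩
      · intro k
        rw [hfoldB, hfoldA]
        exact c1 k
      · intro k hk
        have hkne : k ≠ node := fun h => hnode_done (h ▸ hk)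
        rw [hfoldA, c2 k (by simp [hk]), hstepA' k, if_neg hkne]
      · rw [hfoldB, hfoldA, c3, List.map_cons, List.sum_cons, hfinalnode]
        ring
      · rw [hfoldB, hfoldA, c4, List.map_cons, List.sum_cons, hfinalnode, ← hterm]
        ring
      · rw [hfoldA, show done ++ node :: rest = (done ++ [node]) ++ rest by simp]
        exact c5
-- ----- stage 6: counting -----

-- double sums over lists commute
theorem pv_sum_comm {α : Type} (l1 l2 : List α) (g : α → α → Int) :
    (l1.map (fun y => (l2.map (fun z => g z y)).sum)).sum
      = (l2.map (fun z => (l1.map (fun y => g z y)).sum)).sum := by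
  induction l1 with
  | nil => simp
  | cons y ys ih => simp only [List.map_cons, List.sum_cons, ih, PySem.List.sum_map_add_int]

-- per-z: A's membership count over desc(x) is |reach(z)|
theorem pv_count_eq_len (S Rz : List (Int × Int)) (z : Int × Int)
    (hS : S.Nodup) (hRz : Rz.Nodup) (hsub : Rz ⊆ S) (hirr : z ∉ Rz) :
    (S.countP (fun y => decide (z ≠ y ∧ y ∈ Rz)) : Int) = (Rz.length : Int) := by
  have hperm : (S.filter (fun y => decide (z ≠ y ∧ y ∈ Rz))).Perm Rz := by
    rw [List.perm_ext_iff_of_nodup (hS.filter _) hRz]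
    intro a
    simp only [List.mem_filter, decide_eq_true_eq]
    constructor
    · rintro ⟨_, _, ha⟩; exact ha
    · intro ha
      refine ⟨hsub ha, ?_, ha⟩
      intro he; subst he; exact hirr ha
  rw [List.countP_eq_length_filter, hperm.length_eq]

-- A's nested C2 loops over one descendant set equal the fused per-z length sum
theorem pv_inner_eq (S : List (Int × Int)) (Rf : (Int × Int) → List (Int × Int))
    (hS : S.Nodup) (hR : ∀ z ∈ S, (Rf z).Nodup ∧ Rf z ⊆ S ∧ z ∉ Rf z) (c0 : Int) :
    S.foldl (fun c2 y =>
        S.foldl (fun c2 z => if z ≠ y ∧ y ∈ Rf z then c2 + 1 else c2) c2) c0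
      = c0 + (S.map (fun z => ((Rf z).length : Int))).sum := by
  have hA : ∀ (c2 : Int) (y : Int × Int),
      S.foldl (fun c2 z => if z ≠ y ∧ y ∈ Rf z then c2 + 1 else c2) c2
        = c2 + (S.countP (fun z => decide (z ≠ y ∧ y ∈ Rf z)) : Int) := by
    intro c2 y
    simpa using PySem.List.foldl_count_if (fun z => decide (z ≠ y ∧ y ∈ Rf z)) S c2
  rw [PySem.List.foldl_congr_mem S _
      (fun c2 y => c2 + (S.countP (fun z => decide (z ≠ y ∧ y ∈ Rf z)) : Int)) c0
      (fun c2 y _ => hA c2 y),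
    PySem.List.foldl_add]
  congr 1
  calc (S.map (fun y => (S.countP (fun z => decide (z ≠ y ∧ y ∈ Rf z)) : Int))).sum
      = (S.map (fun y =>
          (S.map (fun z => if decide (z ≠ y ∧ y ∈ Rf z) then (1 : Int) else 0)).sum)).sum := by
        simp only [PySem.List.sum_map_ite_one_zero]
    _ = (S.map (fun z =>
          (S.map (fun y => if decide (z ≠ y ∧ y ∈ Rf z) then (1 : Int) else 0)).sum)).sum :=
        pv_sum_comm S S _
    _ = (S.map (fun z => ((Rf z).length : Int))).sum := by
        refine congrArg _ (List.map_congr_left ?_)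
        intro z hz
        rw [PySem.List.sum_map_ite_one_zero]
        obtain ⟨h1, h2, h3⟩ := hR z hz
        exact pv_count_eq_len S (Rf z) z hS h1 h2 h3

-- sums over two duplicate-free lists agree when every nonzero term lies in both
theorem pv_sum_transfer (l1 l2 : List (Int × Int)) (f : (Int × Int) → Int)
    (h1 : l1.Nodup) (h2 : l2.Nodup) (h : ∀ x, f x ≠ 0 → x ∈ l1 ∧ x ∈ l2) :
    (l1.map f).sum = (l2.map f).sum := by
  have key : ∀ l : List (Int × Int),
      (l.map f).sum = ((l.filter (fun x => decide (f x ≠ 0))).map f).sum := by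
    intro l
    induction l with
    | nil => rfl
    | cons x xs ih =>
        by_cases hx : f x = 0
        · simp [hx, ih]
        · simp [hx, ih]
  have hperm : (l1.filter (fun x => decide (f x ≠ 0))).Perm
      (l2.filter (fun x => decide (f x ≠ 0))) := by
    rw [List.perm_ext_iff_of_nodup (h1.filter _) (h2.filter _)]
    intro a
    simp only [List.mem_filter, decide_eq_true_eq]
    constructor
    · rintro ⟨_, ha⟩; exact ⟨(h a ha).2, ha⟩
    · rintro ⟨_, ha⟩; exact ⟨(h a ha).1, ha⟩
  rw [key l1, key l2, (hperm.map f).sum_eq]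

-- a fold accumulating two independent sums
theorem pv_pairfold (keys : List (Int × Int)) (f g : (Int × Int) → Int)
    (gstep : Int → (Int × Int) → Int) (hg : ∀ c2 x, gstep c2 x = c2 + g x) (a b : Int) :
    keys.foldl (fun rc x => (rc.1 + f x, gstep rc.2 x)) (a, b)
      = (a + (keys.map f).sum, b + (keys.map g).sum) := by
  induction keys generalizing a b with
  | nil => simp
  | cons x xs ih =>
      simp only [List.foldl_cons, List.map_cons, List.sum_cons]
      rw [hg b x, ih]
      simp [add_assoc]

-- ===== VERDICT (by name: the statement is the Claim_ definition above) =====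
theorem count_relations_and_chains_spec : Claim_equal_count_relations_and_chains := by
  intro dag _
  unfold Spec_count_relations_and_chains
  set d : PySem.Dict (Int × Int) (List (Int × Int)) :=
    PySem.Dict.ofList (dag.map (fun t => ((t.1, t.2.1), t.2.2))) with hd
  have hk : d.keys.Nodup := PySem.Dict.nodup_keys_ofList _
  set AN : List (Int × Int) := PySem.Set.update (PySem.Set.ofList d.keys) (pvFlat d) with hAN0
  have hANnd : AN.Nodup := PySem.Set.nodup_update _ _ (PySem.Set.nodup_ofList _)
  have hFl : ∀ n ∈ pvFlat d, n ∈ AN := by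
    intro n hn
    exact (PySem.Set.mem_update _ _ _).mpr (Or.inr hn)
  set q0 : List (Int × Int) :=
    AN.filter (fun n => (PySem.Dict.counter (pvFlat d)).getD n 0 == 0) with hq0
  have hq0sub : ∀ n ∈ q0, n ∈ AN := fun n hn => List.mem_of_mem_filter hn
  have hq0zero : ∀ n ∈ q0, (PySem.Dict.counter (pvFlat d)).getD n 0 = 0 := by
    intro n hn
    simpa using List.of_mem_filter hn
  have hcnt : ∀ n, (PySem.Dict.counter (pvFlat d)).getD n 0 = ((pvFlat d).count n : Int) :=
    fun n => PySem.Dict.getD_counter _ n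
  have hnosrc : ∀ n ∈ q0, ∀ m, n ∈ pvCh d m → False := by
    intro n hn m hm
    have h0 := hq0zero n hn
    rw [hcnt n] at h0
    have h1 : 0 < (pvFlat d).count n := List.count_pos_iff.mpr (pv_mem_flat d m n hm)
    omega
  have hJJ0 : pvJJ d AN q0 (PySem.Dict.counter (pvFlat d)) [] := by
    refine ⟨?_, ?_, ?_, ?_, ?_, ?_, ?_, ?_, ?_⟩
    · intro n
      rw [hcnt n]
      unfold pvE pvCNT
      simp
    · simpa using List.Nodup.filter _ hANnd
    · intro n hn
      rw [hq0zero n (by simpa using hn)]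
    · intro n hn
      exact hq0sub n (by simpa using hn)
    · intro n hn m hm
      exact (hnosrc n hn m hm).elim
    · intro n hn
      exact absurd hn List.not_mem_nil
    · exact List.Pairwise.nil
    · intro a ha
      exact absurd ha List.not_mem_nil
    · intro n hn hself
      exact hnosrc n (by simpa using hn) n hself
  obtain ⟨hbfseq, hTnd, hTpw, hTsl⟩ := pv_mainKahn d AN hk hFl
    (AN.length + (pvFlat d).length) q0 (PySem.Dict.counter (pvFlat d)) [] hJJ0 (by simp)
  set T := kahnLoop d (AN.length + (pvFlat d).length) q0
    (PySem.Dict.counter (pvFlat d)) [] with hT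
  set L := T.reverse with hL0
  have hndL : L.Nodup := List.nodup_reverse.mpr hTnd
  have hpwL : L.Pairwise (fun a b => b ∉ pvCh d a) := by
    rw [hL0, List.pairwise_reverse]
    exact hTpw
  have hselfL : ∀ n ∈ L, n ∉ pvCh d n := by
    intro n hn
    exact hTsl n (by rwa [hL0, List.mem_reverse] at hn)
  set reach0 : PySem.Dict (Int × Int) (PySem.Set (Int × Int)) :=
    AN.foldl (fun dd n => dd.insert n PySem.Set.empty) PySem.Dict.empty with hreach00
  have hreach0 : ∀ k, reach0.getD k [] = [] := by
    rw [hreach00]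
    refine pv_foldl_preserve
      (fun (dd : PySem.Dict (Int × Int) (PySem.Set (Int × Int))) => ∀ k, dd.getD k [] = [])
      AN _ _ ?_ ?_
    · intro k
      exact PySem.Dict.getD_empty k []
    · intro dd n hdd k
      rw [PySem.Dict.getD_insert]
      split_ifs with h
      · rfl
      · exact hdd k
  obtain ⟨P1, P2, P3, P4, P5⟩ := pv_pass d L hndL hpwL hselfL L [] rfl reach0
    PySem.Dict.empty 0 0
    (fun k => by rw [PySem.Dict.getD_empty, hreach0 k])
    ⟨fun k _ => hreach0 k, fun k h => absurd (hreach0 k) h,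
     fun k hk' => absurd hk' List.not_mem_nil⟩
  set rA := L.foldl (pvStepA d) reach0 with hrA
  have hP5 : pvPassInv d L L rA := by simpa using P5
  obtain ⟨F1, F2, F3⟩ := hP5
  have hnodup_all : ∀ k, (rA.getD k []).Nodup := by
    intro k
    by_cases h : k ∈ L
    · exact (F3 k h).1
    · rw [F1 k h]; exact List.nodup_nil
  have hirr : ∀ k, k ∉ rA.getD k [] := by
    intro k
    by_cases h : k ∈ L
    · exact (F3 k h).2.1
    · rw [F1 k h]; exact List.not_mem_nil
  have htrans : ∀ x z, z ∈ rA.getD x [] → rA.getD z [] ⊆ rA.getD x [] := by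
    intro x z hz
    by_cases h : x ∈ L
    · exact ((F3 x h).2.2 z hz).2
    · rw [F1 x h] at hz
      exact absurd hz List.not_mem_nil
  have hsupp : ∀ x, rA.getD x [] ≠ [] → x ∈ d.keys ∧ x ∈ L := by
    intro x hx
    have hxL : x ∈ L := by
      by_contra h
      exact hx (F1 x h)
    refine ⟨?_, hxL⟩
    by_contra hxk
    exact F2 x hx (pv_ch_zero_of_not_mem_keys d x hxk)
  -- A's result, as a pair of sums over the final table
  have htc_eq : transitive_closure d = rA := by
    have h1 : transitive_closure d
        = (kahnLoop d ((tcInit d).2.length + (d.items.map (fun p => p.2.length)).sum)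
            ((tcInit d).2.filter (fun n => (tcInit d).1.getD n 0 == 0)) (tcInit d).1 []).reverse.foldl
            (pvStepA d)
            ((tcInit d).2.foldl (fun dd n => dd.insert n PySem.Set.empty) PySem.Dict.empty) := rfl
    rw [h1, pv_tcInit_eq d]
    rw [show (List.map (fun p => p.2.length) d.items).sum = (pvFlat d).length from
      (List.length_flatMap).symm]
    try rfl
  have hAeq : count_relations_and_chains dag
      = (0 + (d.keys.map (fun x => ((rA.getD x []).length : Int))).sum,
         0 + (d.keys.map (fun x =>
            ((rA.getD x []).map (fun z => ((rA.getD z []).length : Int))).sum)).sum) := by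
    have h1 : count_relations_and_chains dag
        = d.keys.foldl (fun rc x =>
            (rc.1 + (((transitive_closure d).getD x []).length : Int),
             ((transitive_closure d).getD x []).foldl (fun c2 y =>
               ((transitive_closure d).getD x []).foldl
                 (fun c2 z => if z ≠ y ∧ y ∈ (transitive_closure d).getD z [] then c2 + 1 else c2)
                 c2) rc.2)) ((0 : Int), (0 : Int)) := rfl
    rw [h1, htc_eq]
    exact pv_pairfold d.keys _ _ _
      (fun c2 x => pv_inner_eq (rA.getD x []) (fun z => rA.getD z []) (hnodup_all x)
        (fun z hz => ⟨hnodup_all z, htrans x z hz, hirr z⟩) c2) 0 0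
  -- B's result, as the same sums over the topological order
  have hbfseq' : bfsLoop d (AN.length + (pvFlat d).length) 0 q0
      (PySem.Dict.counter (pvFlat d)) = T := by
    simpa using hbfseq
  have hBeq : count_relations_and_chains_alt dag
      = (0 + (L.map (fun x => ((rA.getD x []).length : Int))).sum,
         0 + (L.map (fun x =>
            ((rA.getD x []).map (fun z => ((rA.getD z []).length : Int))).sum)).sum) := by
    have h1 : count_relations_and_chains_alt dag
        = (((bfsLoop d ((PySem.Set.update (PySem.Set.ofList d.keys)
              (PySem.Dict.counter (pvFlat d)).keys).length + (pvFlat d).length) 0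
              ((PySem.Set.update (PySem.Set.ofList d.keys)
                (PySem.Dict.counter (pvFlat d)).keys).filter
                (fun n => (PySem.Dict.counter (pvFlat d)).getD n 0 == 0))
              (PySem.Dict.counter (pvFlat d))).reverse.foldl (pvStepB d)
              (PySem.Dict.empty, (0 : Int), (0 : Int))).2.1,
           ((bfsLoop d ((PySem.Set.update (PySem.Set.ofList d.keys)
              (PySem.Dict.counter (pvFlat d)).keys).length + (pvFlat d).length) 0
              ((PySem.Set.update (PySem.Set.ofList d.keys)
                (PySem.Dict.counter (pvFlat d)).keys).filter
                (fun n => (PySem.Dict.counter (pvFlat d)).getD n 0 == 0))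
              (PySem.Dict.counter (pvFlat d))).reverse.foldl (pvStepB d)
              (PySem.Dict.empty, (0 : Int), (0 : Int))).2.2) := rfl
    rw [h1, pv_allNodes_eq d, hbfseq']
    rw [show T.reverse = L from rfl]
    rw [P3, P4]
  rw [hAeq, hBeq]
  have hsupp1 : ∀ x, ((rA.getD x []).length : Int) ≠ 0 → x ∈ d.keys ∧ x ∈ L := by
    intro x hx
    refine hsupp x ?_
    intro he
    rw [he] at hx
    simp at hx
  have hsupp2 : ∀ x, ((rA.getD x []).map (fun z => ((rA.getD z []).length : Int))).sum ≠ 0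
      → x ∈ d.keys ∧ x ∈ L := by
    intro x hx
    refine hsupp x ?_
    intro he
    rw [he] at hx
    simp at hx
  refine Prod.ext ?_ ?_
  · simp only []
    rw [pv_sum_transfer d.keys L _ hk hndL hsupp1]
  · simp only []
    rw [pv_sum_transfer d.keys L _ hk hndL hsupp2]
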